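-- pv_equiv track=rewrite | github.com/neburnodr/PoemAutomator | data/analyse_verses.py | consonant_rhyme_finder
-- ===== SOURCE A (Python) =====
-- import string
--
-- vowels = "aeiouáéíóúAEIOUÁÉÍÓÚ"
--
-- debiles = "UIui"
--
-- capitals = string.ascii_uppercase
--
-- def consonant_rhyme_finder(last_word, agullaesdr):
--     if not last_word.startswith("-"):
--         last_word = "-" + last_word
--     if agullaesdr == -1:
--         # esdrújula
--         while last_word.count("-") > 3:
--             last_word = last_word[last_word.find("-", 1):]
--     elif agullaesdr == 0:
--         # llana
--         while last_word.count("-") > 2: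
--             last_word = last_word[last_word.find("-", 1):]
--     else:
--         # aguda
--         while last_word.count("-") > 1:
--             last_word = last_word[last_word.find("-", 1):]
--
--     block_clean = "".join([letter for letter in last_word if letter != "-"])
--
--     if len(block_clean) > 1 and not all(
--         letter in capitals for letter in block_clean
--     ):
--
--         while block_clean[0] not in vowels:
--             if len(block_clean) > 2:
--                 if block_clean[0].lower() in "qg" and (
--                         block_clean[1].lower() == "u" and (
--                         block_clean[2].lower() in "ieíé")):
--                     block_clean = block_clean[2:]
--
--                 else:
--                     block_clean = block_clean[1:]
--             else:
--                 block_clean = block_clean[1:]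
--
--             if len(block_clean) == 1:
--                 break
--
--         if (len(block_clean) > 1
--             and block_clean[0] in debiles
--             and block_clean[1] in vowels):
--             block_clean = block_clean[1:]
--
--     if " " in block_clean:
--         block_clean = "".join([letter for letter in block_clean if letter != " "])
--     return block_clean
-- ===== SOURCE B (Python) =====
-- import string
--
-- vowels = "aeiouáéíóúAEIOUÁÉÍÓÚ"
-- debiles = "UIui"
-- capitals = string.ascii_uppercase
--
-- def consonant_rhyme_finder(last_word, agullaesdr):
--     if not last_word.startswith("-"):
--         last_word = "-" + last_word
--     # keep the letters of the last k syllable segments (3 esdrujula / 2 llana / 1 aguda)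
--     k = 3 if agullaesdr == -1 else (2 if agullaesdr == 0 else 1)
--     parts = last_word.split("-")[1:]
--     block = "".join(parts[-k:])
--
--     if len(block) > 1 and not all(c in capitals for c in block):
--         # advance an index past leading consonants, then slice once
--         i, n = 0, len(block)
--         while block[i] not in vowels:
--             if (n - i > 2 and block[i].lower() in "qg"
--                     and block[i + 1].lower() == "u"
--                     and block[i + 2].lower() in "ieíé"):
--                 i += 2
--             else:
--                 i += 1
--             if n - i == 1:
--                 break
--         block = block[i:]
--         if len(block) > 1 and block[0] in debiles and block[1] in vowels:
--             block = block[1:]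
--
--     return block.replace(" ", "")
-- ===== Notes on version B (the rewrite author's own statement) =====
-- stated objective: faster
-- what changed: B replaces A's repeated count/find/slice while-loop for syllable trimming by a single split('-') plus one negative slice of the last k segments, and A's repeated one-character re-slicing consonant loop by an index advanced over the block with a single final slice and a replace(' ','') instead of a conditional join.
import Mathlib
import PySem

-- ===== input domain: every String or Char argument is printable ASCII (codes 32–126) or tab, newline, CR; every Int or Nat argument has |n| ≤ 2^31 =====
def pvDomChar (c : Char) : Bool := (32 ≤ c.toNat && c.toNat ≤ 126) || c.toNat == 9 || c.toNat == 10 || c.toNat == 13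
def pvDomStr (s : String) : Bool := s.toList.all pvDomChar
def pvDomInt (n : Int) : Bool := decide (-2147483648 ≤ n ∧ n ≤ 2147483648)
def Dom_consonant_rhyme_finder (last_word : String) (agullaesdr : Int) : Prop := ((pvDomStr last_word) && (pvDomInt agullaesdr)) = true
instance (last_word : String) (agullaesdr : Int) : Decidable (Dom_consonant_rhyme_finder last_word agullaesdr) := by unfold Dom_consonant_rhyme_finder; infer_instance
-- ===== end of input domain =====

-- B replaces A's repeated count/find/slice syllable trimming by one split("-") plus a
-- negative slice, and A's repeated one-character re-slicing consonant loop by an index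
-- advance with a single final slice (objective: faster, measured).

-- constants shared by both programs (module-level in the Python source)
def pvVowels : List Char := "aeiouáéíóúAEIOUÁÉÍÓÚ".toList
def pvDebiles : List Char := "UIui".toList
def pvCapitals : List Char := "ABCDEFGHIJKLMNOPQRSTUVWXYZ".toList

-- ===== PORT A =====

-- while last_word.count("-") > k: last_word = last_word[last_word.find("-", 1):]
-- (fuel = length of the string makes the while loop total; the proof shows it suffices)
def pvLoopA (k : Nat) : Nat → List Char → List Char
  | 0, s => s
  | fuel + 1, s =>
    if k < PySem.Chars.count s ['-'] then
      pvLoopA k fuel (PySem.Chars.slice s (some (PySem.Chars.findFrom s ['-'] 1)) none)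
    else s

-- while block_clean[0] not in vowels: … (slicing off 1 or 2 chars each turn)
def pvStripA : List Char → List Char
  | [] => []   -- loop is only entered with len > 1; [] returns itself
  | c :: rest =>
    if c ∈ pvVowels then c :: rest
    else
      let cs' :=
        if 2 < (c :: rest).length ∧ PySem.Chars.lowerChar c ∈ "qg".toList ∧
            PySem.Chars.lowerChar ((c :: rest).getD 1 ' ') = 'u' ∧
            PySem.Chars.lowerChar ((c :: rest).getD 2 ' ') ∈ "ieíé".toList
        then (c :: rest).drop 2 else (c :: rest).drop 1
      if cs'.length == 1 then cs' else pvStripA cs'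
termination_by cs => cs.length
decreasing_by all_goals (split_ifs <;> simp <;> omega)

def consonant_rhyme_finder (last_word : String) (agullaesdr : Int) : String :=
  let s := last_word.toList
  let s := if PySem.Chars.startswith s ['-'] then s else '-' :: s
  let s := if agullaesdr == -1 then pvLoopA 3 s.length s
           else if agullaesdr == 0 then pvLoopA 2 s.length s
           else pvLoopA 1 s.length s
  -- block_clean = "".join([letter for letter in last_word if letter != "-"])
  let block := s.filter (fun c => c ≠ '-')
  let block :=
    if 1 < block.length ∧ ¬ block.all (fun c => c ∈ pvCapitals) then
      let b := pvStripA block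
      -- indexing b[0], b[1] is guarded by len(b) > 1
      if 1 < b.length ∧ b.getD 0 ' ' ∈ pvDebiles ∧ b.getD 1 ' ' ∈ pvVowels
      then b.drop 1 else b
    else block
  let block := if ' ' ∈ block then block.filter (fun c => c ≠ ' ') else block
  String.ofList block

-- ===== PORT B =====

-- i advanced over block past leading consonants (Source B's index while-loop);
-- the 'i < n' guard only makes the indexing total (Source B never leaves i < n)
def pvAltIdx (cs : List Char) (n i : Nat) : Nat :=
  if _h : i < n then
    if cs.getD i ' ' ∈ pvVowels then i
    else
      let i' :=
        if 2 < n - i ∧ PySem.Chars.lowerChar (cs.getD i ' ') ∈ "qg".toList ∧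
            PySem.Chars.lowerChar (cs.getD (i + 1) ' ') = 'u' ∧
            PySem.Chars.lowerChar (cs.getD (i + 2) ' ') ∈ "ieíé".toList
        then i + 2 else i + 1
      if n - i' == 1 then i' else pvAltIdx cs n i'
  else i
termination_by n - i
decreasing_by all_goals (split_ifs <;> omega)

def consonant_rhyme_finder_alt (last_word : String) (agullaesdr : Int) : String :=
  let s := last_word.toList
  let s := if PySem.Chars.startswith s ['-'] then s else '-' :: s
  let k : Nat := if agullaesdr == -1 then 3 else if agullaesdr == 0 then 2 else 1
  let parts := (PySem.Chars.splitOn s ['-']).drop 1      -- last_word.split("-")[1:]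
  let block := (PySem.List.slice parts (some (-(k : Int))) none).flatten   -- "".join(parts[-k:])
  let block :=
    if 1 < block.length ∧ ¬ block.all (fun c => c ∈ pvCapitals) then
      let b := block.drop (pvAltIdx block block.length 0)   -- block[i:]
      if 1 < b.length ∧ b.getD 0 ' ' ∈ pvDebiles ∧ b.getD 1 ' ' ∈ pvVowels
      then b.drop 1 else b
    else block
  String.ofList (PySem.Chars.replace block [' '] [])           -- block.replace(" ", "")

-- ===== PRECONDITION & SPEC =====
def Spec_consonant_rhyme_finder (last_word : String) (agullaesdr : Int) (out : String) : Prop := out = consonant_rhyme_finder_alt last_word agullaesdr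
instance (last_word : String) (agullaesdr : Int) (out : String) : Decidable (Spec_consonant_rhyme_finder last_word agullaesdr out) := by unfold Spec_consonant_rhyme_finder; infer_instance

-- ===== CLAIM (what is proved, stated in full; the proofs are below) =====
def Claim_equal_consonant_rhyme_finder : Prop := ∀ (last_word : String) (agullaesdr : Int), Dom_consonant_rhyme_finder last_word agullaesdr → Spec_consonant_rhyme_finder last_word agullaesdr (consonant_rhyme_finder last_word agullaesdr)

-- ===== LEMMAS AND PROOFS =====

-- clean model of Python str.split on the single character c
def pvSplit (c : Char) : List Char → List (List Char)
  | [] => [[]]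
  | a :: t =>
    if a = c then [] :: pvSplit c t
    else
      match pvSplit c t with
      | [] => [[a]]
      | p :: ps => (a :: p) :: ps

theorem pvSplit_ne_nil (c : Char) (l : List Char) : pvSplit c l ≠ [] := by
  induction l with
  | nil => simp [pvSplit]
  | cons a t ih =>
    simp only [pvSplit]
    split
    · simp
    · split <;> simp_all

theorem pvSplit_flatten (c : Char) (l : List Char) :
    (pvSplit c l).flatten = l.filter (· ≠ c) := by
  induction l with
  | nil => simp [pvSplit]
  | cons a t ih =>
    simp only [pvSplit]
    split
    · simp_all
    · split
      · next h hn => exact absurd hn (pvSplit_ne_nil c t)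
      · next h p ps hps => simp_all

theorem pvSplit_length (c : Char) (l : List Char) :
    (pvSplit c l).length = l.count c + 1 := by
  induction l with
  | nil => simp [pvSplit]
  | cons a t ih =>
    simp only [pvSplit]
    split
    · simp_all
    · split
      · next h hn => exact absurd hn (pvSplit_ne_nil c t)
      · next h p ps hps => simp_all [List.count_cons]

theorem pvSplit_append (c : Char) (xs ys : List Char) (hx : c ∉ xs) :
    pvSplit c (xs ++ c :: ys) = xs :: pvSplit c ys := by
  induction xs with
  | nil => simp [pvSplit]
  | cons a t ih =>
    have h1 : c ≠ a := by simp_all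
    have h2 : c ∉ t := by simp_all
    simp only [List.cons_append, pvSplit, ih h2, if_neg (Ne.symm h1)]

theorem pv_splitOn_go (c : Char) (fuel : Nat) :
    ∀ (l cur : List Char) (acc : List (List Char)), l.length ≤ fuel →
      PySem.Chars.splitOn.go [c] fuel l cur acc =
        acc.reverse ++ (match pvSplit c l with
          | [] => [cur.reverse]
          | p :: ps => (cur.reverse ++ p) :: ps) := by
  induction fuel with
  | zero =>
    intro l cur acc h
    have : l = [] := List.length_eq_zero_iff.mp (Nat.le_zero.mp h)
    subst this
    simp [PySem.Chars.splitOn.go, pvSplit]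
  | succ fuel ih =>
    intro l cur acc h
    cases l with
    | nil => simp [PySem.Chars.splitOn.go, pvSplit]
    | cons a t =>
      by_cases hac : a = c
      · subst hac
        rw [show PySem.Chars.splitOn.go [a] (fuel+1) (a::t) cur acc
              = PySem.Chars.splitOn.go [a] fuel t [] (cur.reverse :: acc) by
            simp [PySem.Chars.splitOn.go, List.isPrefixOf]]
        rw [ih t [] (cur.reverse :: acc) (by simpa using Nat.lt_succ_iff.mp (by simpa using h))]
        simp only [pvSplit, if_pos rfl, List.reverse_cons, List.append_assoc,
          List.singleton_append]
        cases hps : pvSplit a t with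
        | nil => exact absurd hps (pvSplit_ne_nil a t)
        | cons p ps => simp
      · rw [show PySem.Chars.splitOn.go [c] (fuel+1) (a::t) cur acc
              = PySem.Chars.splitOn.go [c] fuel t (a :: cur) acc by
            simp [PySem.Chars.splitOn.go, List.isPrefixOf, Ne.symm hac]]
        rw [ih t (a :: cur) acc (by simpa using Nat.lt_succ_iff.mp (by simpa using h))]
        simp only [pvSplit, if_neg hac]
        cases hps : pvSplit c t with
        | nil => exact absurd hps (pvSplit_ne_nil c t)
        | cons p ps => simp

theorem pv_splitOn (c : Char) (l : List Char) :
    PySem.Chars.splitOn l [c] = pvSplit c l := by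
  rw [PySem.Chars.splitOn, pv_splitOn_go c (l.length + 1) l [] [] (by omega)]
  cases hps : pvSplit c l with
  | nil => exact absurd hps (pvSplit_ne_nil c l)
  | cons p ps => simp

theorem pv_count_go (c : Char) (fuel : Nat) :
    ∀ (l : List Char) (acc : Nat), l.length ≤ fuel →
      PySem.Chars.count.go [c] fuel l acc = acc + l.count c := by
  induction fuel with
  | zero =>
    intro l acc h
    have : l = [] := List.length_eq_zero_iff.mp (Nat.le_zero.mp h)
    subst this
    simp [PySem.Chars.count.go]
  | succ fuel ih =>
    intro l acc h
    cases l with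
    | nil => simp [PySem.Chars.count.go]
    | cons a t =>
      by_cases hac : c = a
      · subst hac
        rw [show PySem.Chars.count.go [c] (fuel+1) (c::t) acc
              = PySem.Chars.count.go [c] fuel t (acc+1) by
            simp [PySem.Chars.count.go, List.isPrefixOf]]
        rw [ih t (acc+1) (by simpa using Nat.lt_succ_iff.mp (by simpa using h))]
        simp [List.count_cons]
        omega
      · rw [show PySem.Chars.count.go [c] (fuel+1) (a::t) acc
              = PySem.Chars.count.go [c] fuel t acc by
            simp [PySem.Chars.count.go, List.isPrefixOf, hac]]
        rw [ih t acc (by simpa using Nat.lt_succ_iff.mp (by simpa using h))]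
        simp [List.count_cons, Ne.symm hac]

theorem pv_count (c : Char) (l : List Char) :
    PySem.Chars.count l [c] = l.count c := by
  rw [PySem.Chars.count, if_neg (by simp), pv_count_go c l.length l 0 le_rfl]
  simp

theorem pv_find_go (c : Char) (l : List Char) :
    ∀ (k : Nat), PySem.Chars.find.go [c] l k =
      if c ∈ l then ((k : Int) + l.findIdx (· == c)) else -1 := by
  induction l with
  | nil => intro k; simp [PySem.Chars.find.go]
  | cons a t ih =>
    intro k
    by_cases hac : a = c
    · subst hac
      rw [show PySem.Chars.find.go [a] (a::t) k = (k : Int) by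
            simp [PySem.Chars.find.go, List.isPrefixOf]]
      simp [List.findIdx_cons]
    · rw [show PySem.Chars.find.go [c] (a::t) k = PySem.Chars.find.go [c] t (k+1) by
            simp [PySem.Chars.find.go, List.isPrefixOf, Ne.symm hac]]
      rw [ih (k+1)]
      simp only [List.mem_cons, List.findIdx_cons, hac]
      split
      · next hmem =>
        rw [if_pos (Or.inr hmem)]
        rw [show (a == c) = false by simp [hac]]
        simp only [cond_false]
        push_cast
        ring
      · next hmem =>
        rw [if_neg (by exact fun h => h.elim (fun h1 => hac h1.symm) hmem)]

theorem pv_find (c : Char) (l : List Char) :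
    PySem.Chars.find l [c] = if c ∈ l then (l.findIdx (· == c) : Int) else -1 := by
  rw [PySem.Chars.find, pv_find_go]
  simp

theorem pv_replace_go (c : Char) (fuel : Nat) :
    ∀ (l acc : List Char), l.length ≤ fuel →
      PySem.Chars.replace.go [c] [] fuel l acc = acc.reverse ++ l.filter (· ≠ c) := by
  induction fuel with
  | zero =>
    intro l acc h
    have : l = [] := List.length_eq_zero_iff.mp (Nat.le_zero.mp h)
    subst this
    simp [PySem.Chars.replace.go]
  | succ fuel ih =>
    intro l acc h
    cases l with
    | nil => simp [PySem.Chars.replace.go]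
    | cons a t =>
      by_cases hac : c = a
      · subst hac
        rw [show PySem.Chars.replace.go [c] [] (fuel+1) (c::t) acc
              = PySem.Chars.replace.go [c] [] fuel t acc by
            simp [PySem.Chars.replace.go, List.isPrefixOf]]
        rw [ih t acc (by simpa using Nat.lt_succ_iff.mp (by simpa using h))]
        simp [List.filter_cons]
      · rw [show PySem.Chars.replace.go [c] [] (fuel+1) (a::t) acc
              = PySem.Chars.replace.go [c] [] fuel t (a :: acc) by
            simp [PySem.Chars.replace.go, List.isPrefixOf, hac]]
        rw [ih t (a :: acc) (by simpa using Nat.lt_succ_iff.mp (by simpa using h))]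
        simp [List.filter_cons, Ne.symm hac]

theorem pv_replace (c : Char) (l : List Char) :
    PySem.Chars.replace l [c] [] = l.filter (· ≠ c) := by
  rw [PySem.Chars.replace, if_neg (by simp), pv_replace_go c l.length l [] le_rfl]
  simp

theorem pv_not_mem_take_findIdx (c : Char) (l : List Char) :
    c ∉ l.take (l.findIdx (· == c)) := by
  induction l with
  | nil => simp
  | cons a t ih =>
    by_cases hac : a = c
    · simp [List.findIdx_cons, hac]
    · simp only [List.findIdx_cons, show (a == c) = false by simp [hac], cond_false,
        List.take_succ_cons, List.mem_cons]
      exact fun h => h.elim (fun h1 => hac h1.symm) ih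

theorem pv_drop_findIdx (c : Char) (l : List Char) (h : c ∈ l) :
    l.drop (l.findIdx (· == c)) = c :: l.drop (l.findIdx (· == c) + 1) := by
  induction l with
  | nil => simp at h
  | cons a t ih =>
    by_cases hac : a = c
    · simp [List.findIdx_cons, hac]
    · have hct : c ∈ t := by
        rcases List.mem_cons.mp h with h1 | h1
        · exact absurd h1.symm hac
        · exact h1
      simp only [List.findIdx_cons, show (a == c) = false by simp [hac], cond_false,
        List.drop_succ_cons]
      exact ih hct

-- A's trim loop, on a string beginning with '-', keeps exactly the last k split segments
theorem pvLoopA_aux (k : Nat) (hk : 0 < k) :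
    ∀ (n : Nat) (rest : List Char) (f : Nat), rest.length ≤ n → rest.length + 1 ≤ f →
      ((pvLoopA k f ('-' :: rest)).filter (· ≠ '-')) =
        ((pvSplit '-' rest).drop ((pvSplit '-' rest).length - k)).flatten := by
  intro n
  induction n using Nat.strong_induction_on with
  | _ n ih =>
    intro rest f hn hf
    cases f with
    | zero => omega
    | succ f =>
      have hcount : PySem.Chars.count ('-' :: rest) ['-'] = rest.count '-' + 1 := by
        rw [pv_count]; simp [List.count_cons]
      rw [pvLoopA]
      by_cases hlt : k < rest.count '-' + 1
      · rw [if_pos (by rw [hcount]; exact hlt)]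
        have hmem : '-' ∈ rest := List.count_pos_iff.mp (by omega)
        have hj := pv_drop_findIdx '-' rest hmem
        have hnm := pv_not_mem_take_findIdx '-' rest
        set j := rest.findIdx (· == '-') with hjdef
        have hjlt : j < rest.length := List.findIdx_lt_length_of_exists ⟨'-', hmem, by simp⟩
        have hfind : PySem.Chars.findFrom ('-' :: rest) ['-'] 1 = ((j + 1 : Nat) : Int) := by
          have h1 : ((1 : Nat) : Int) = (1 : Int) := by norm_num
          have := PySem.Chars.findFrom_natCast ('-' :: rest) ['-'] 1 (by simp)
          rw [h1] at this
          rw [this, List.drop_succ_cons, List.drop_zero, pv_find, if_pos hmem,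
            if_neg (by omega)]
          push_cast; ring
        rw [hfind, PySem.Chars.slice_eq_listSlice, PySem.List.slice_from_natCast,
          List.drop_succ_cons, hj]
        have hsp : rest.take j ++ '-' :: rest.drop (j + 1) = rest := by
          conv_rhs => rw [← List.take_append_drop j rest]
          rw [hj]
        have hsplit : pvSplit '-' rest = rest.take j :: pvSplit '-' (rest.drop (j + 1)) := by
          conv_lhs => rw [← hsp]
          rw [pvSplit_append _ _ _ hnm]
        have hcnt' : rest.count '-' = (rest.drop (j + 1)).count '-' + 1 := by
          conv_lhs => rw [← hsp]
          rw [List.count_append, List.count_cons, List.count_eq_zero.mpr hnm]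
          simp
        have hkle : k ≤ (pvSplit '-' (rest.drop (j + 1))).length := by
          rw [pvSplit_length]; omega
        rw [ih (rest.drop (j + 1)).length (by simp; omega) (rest.drop (j + 1)) f
          le_rfl (by simp; omega)]
        rw [hsplit, List.length_cons,
          show (pvSplit '-' (rest.drop (j + 1))).length + 1 - k
            = ((pvSplit '-' (rest.drop (j + 1))).length - k) + 1 by omega,
          List.drop_succ_cons]
      · rw [if_neg (by rw [hcount]; exact hlt)]
        have hle : (pvSplit '-' rest).length ≤ k := by rw [pvSplit_length]; omega
        rw [Nat.sub_eq_zero_of_le hle, List.drop_zero, pvSplit_flatten]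
        simp [List.filter_cons]

theorem pvLoopA_spec (k : Nat) (hk : 0 < k) (rest : List Char) (f : Nat)
    (hf : rest.length + 1 ≤ f) :
    ((pvLoopA k f ('-' :: rest)).filter (· ≠ '-')) =
      ((pvSplit '-' rest).drop ((pvSplit '-' rest).length - k)).flatten :=
  pvLoopA_aux k hk rest.length rest f le_rfl hf

theorem pv_getD_drop (cs : List Char) (i j : Nat) (d : Char) :
    (cs.drop i).getD j d = cs.getD (i + j) d := by
  simp [List.getD, List.getElem?_drop]

-- B's index loop computes exactly the suffix A's slicing loop leaves
theorem pvStrip_eq_aux (cs : List Char) :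
    ∀ (d i : Nat), d = cs.length - i → 2 ≤ d →
      pvStripA (cs.drop i) = cs.drop (pvAltIdx cs cs.length i) := by
  intro d
  induction d using Nat.strong_induction_on with
  | _ d ih =>
    intro i hd h2
    have hi : i < cs.length := by omega
    have hdrop : cs.drop i = cs[i] :: cs.drop (i + 1) := List.drop_eq_getElem_cons hi
    have hgd0 : cs.getD i ' ' = cs[i] := List.getD_eq_getElem cs ' ' hi
    rw [pvAltIdx, dif_pos hi, hgd0]
    by_cases hv : cs[i] ∈ pvVowels
    · rw [if_pos hv, hdrop, pvStripA, if_pos hv, ← hdrop]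
    · rw [if_neg hv, hdrop, pvStripA, if_neg hv]
      simp only [← hdrop, List.length_drop, pv_getD_drop, List.drop_drop, beq_iff_eq]
      by_cases hq : 2 < cs.length - i ∧ PySem.Chars.lowerChar cs[i] ∈ "qg".toList ∧
          PySem.Chars.lowerChar (cs.getD (i + 1) ' ') = 'u' ∧
          PySem.Chars.lowerChar (cs.getD (i + 2) ' ') ∈ "ieíé".toList
      · simp only [if_pos hq, List.length_drop]
        by_cases h1 : cs.length - (i + 2) = 1
        · rw [if_pos h1, if_pos h1]
        · rw [if_neg h1, if_neg h1]
          exact ih (cs.length - (i + 2)) (by omega) (i + 2) rfl (by omega)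
      · simp only [if_neg hq, List.length_drop]
        by_cases h1 : cs.length - (i + 1) = 1
        · rw [if_pos h1, if_pos h1]
        · rw [if_neg h1, if_neg h1]
          exact ih (cs.length - (i + 1)) (by omega) (i + 1) rfl (by omega)

theorem pvStrip_eq (cs : List Char) (i : Nat) (h2 : 2 ≤ cs.length - i) :
    pvStripA (cs.drop i) = cs.drop (pvAltIdx cs cs.length i) := by
  exact pvStrip_eq_aux cs (cs.length - i) i rfl h2

-- ===== VERDICT (by name: the statement is the Claim_ definition above) =====
theorem pv_block_eq (k : Nat) (hk : 0 < k) (rest : List Char) :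
    (pvLoopA k ('-' :: rest).length ('-' :: rest)).filter (fun c => c ≠ '-') =
      (PySem.List.slice ((PySem.Chars.splitOn ('-' :: rest) ['-']).drop 1)
        (some (-(k : Int))) none).flatten := by
  rw [pv_splitOn, show pvSplit '-' ('-' :: rest) = [] :: pvSplit '-' rest by simp [pvSplit],
    List.drop_succ_cons, List.drop_zero, PySem.List.slice_from_neg_natCast _ k hk]
  exact pvLoopA_spec k hk rest _ (by simp)

theorem pv_mid_eq (block : List Char) :
    (if 1 < block.length ∧ ¬ block.all (fun c => c ∈ pvCapitals) then
      let b := pvStripA block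
      if 1 < b.length ∧ b.getD 0 ' ' ∈ pvDebiles ∧ b.getD 1 ' ' ∈ pvVowels
      then b.drop 1 else b
    else block) =
    (if 1 < block.length ∧ ¬ block.all (fun c => c ∈ pvCapitals) then
      let b := block.drop (pvAltIdx block block.length 0)
      if 1 < b.length ∧ b.getD 0 ' ' ∈ pvDebiles ∧ b.getD 1 ' ' ∈ pvVowels
      then b.drop 1 else b
    else block) := by
  by_cases h : 1 < block.length ∧ ¬ block.all (fun c => c ∈ pvCapitals)
  · rw [if_pos h, if_pos h]
    have := pvStrip_eq block 0 (by omega)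
    rw [List.drop_zero] at this
    rw [this]
  · rw [if_neg h, if_neg h]

theorem pv_last_eq (b : List Char) :
    (if ' ' ∈ b then b.filter (fun c => c ≠ ' ') else b) =
      PySem.Chars.replace b [' '] [] := by
  rw [pv_replace]
  by_cases h : ' ' ∈ b
  · rw [if_pos h]
  · rw [if_neg h]
    exact (List.filter_eq_self.mpr (fun x hx => by
      simp only [ne_eq, decide_eq_true_eq]
      exact fun e => h (e ▸ hx))).symm

theorem consonant_rhyme_finder_spec : Claim_equal_consonant_rhyme_finder := by
  intro last_word agullaesdr _dom
  unfold Spec_consonant_rhyme_finder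
  obtain ⟨rest, hs⟩ : ∃ rest,
      (if PySem.Chars.startswith last_word.toList ['-'] then last_word.toList
       else '-' :: last_word.toList) = '-' :: rest := by
    by_cases h : PySem.Chars.startswith last_word.toList ['-']
    · rw [if_pos h]
      cases hl : last_word.toList with
      | nil => rw [hl] at h; simp [PySem.Chars.startswith, List.isPrefixOf] at h
      | cons a t =>
        rw [hl] at h
        have ha : '-' = a := by
          simpa [PySem.Chars.startswith, List.isPrefixOf] using h
        exact ⟨t, by rw [← ha]⟩
    · exact ⟨last_word.toList, if_neg h⟩
  simp only [consonant_rhyme_finder, consonant_rhyme_finder_alt, hs]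
  by_cases h1 : agullaesdr == -1
  · simp only [h1, if_pos]
    rw [pv_block_eq 3 (by omega) rest, pv_mid_eq, pv_last_eq]
  · by_cases h2 : agullaesdr == 0
    · simp only [h1, h2, if_false, if_true, Bool.false_eq_true]
      rw [pv_block_eq 2 (by omega) rest, pv_mid_eq, pv_last_eq]
    · simp only [h1, h2, if_false, Bool.false_eq_true]
      rw [pv_block_eq 1 (by omega) rest, pv_mid_eq, pv_last_eq]
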